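-- pv_equiv track=rewrite | github.com/Flopz-Project/flopz | flopz/arch/arm/thumb/instructions.py | encode_to_12b_imm
-- ===== SOURCE A (Python) =====
-- def encode_to_12b_imm(value: int) -> int:
--     if value > 0xFFFFFFFF:
--         raise ValueError(f" Value {value} to large to be encoded")
--     # check for pattens
--     if value in range(256):
--         return value
--     elif value & 0xFF00FF00 == 0 and (value & 0xFF) == (value >> 16) & 0xFF:
--         # can encode immediate of form 0x00XY00XY
--         return 0x100 + (value & 0xFF)
--     elif value & 0x00FF00FF == 0 and (value >> 8) & 0xFF == (value >> 24) & 0xFF: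
--         # can encode immediate of form 0xXY00XY00
--         return 0x200 + ((value >> 8) & 0xFF)
--     elif value >> 24 == (value >> 16) & 0xFF == (value >> 8) & 0xFF == value & 0xFF:
--         # can encode immediate of form 0xXYXYXYXY
--         return 0x300 + (value & 0xFF)
--     else:
--         org_val = value
--         # check if the value is a shifted 8bit value
--         left_shifts = 0
--         while value & 0xFFFFFF != 0:
--             left_shifts += 1
--             value <<= 1
--         if 0xFFFFFF00FFFFFF & value != 0:
--             raise ValueError(f" Value {org_val} (binary: {org_val:b}) not encodeable as ARM 12bit immediate.")
--
--         value = (value & 0xFF000000) >> 24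
--         left_shifts += 8
--
--         while value >> 7 != 1:
--             left_shifts += 1
--             value <<= 1
--
--         return (left_shifts << 7) + (value & 0x7F)
-- ===== SOURCE B (Python) =====
-- def encode_to_12b_imm(value: int) -> int:
--     if value > 0xFFFFFFFF:
--         raise ValueError(f" Value {value} to large to be encoded")
--     # four special encodings, checked in the same order
--     if value in range(256):
--         return value
--     if value & 0xFF00FF00 == 0 and (value & 0xFF) == (value >> 16) & 0xFF:
--         return 0x100 + (value & 0xFF)
--     if value & 0x00FF00FF == 0 and (value >> 8) & 0xFF == (value >> 24) & 0xFF: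
--         return 0x200 + ((value >> 8) & 0xFF)
--     if value >> 24 == (value >> 16) & 0xFF == (value >> 8) & 0xFF == value & 0xFF:
--         return 0x300 + (value & 0xFF)
--     # rotated 8-bit value: closed form instead of the two shift loops
--     if value <= 0:
--         raise ValueError(f" Value {value} (binary: {value:b}) not encodeable as ARM 12bit immediate.")
--     q = value.bit_length() - 1            # highest set bit
--     lsb = (value & -value).bit_length() - 1  # lowest set bit
--     if q - lsb > 7:
--         raise ValueError(f" Value {value} (binary: {value:b}) not encodeable as ARM 12bit immediate.")
--     # normalize so the top set bit lands on bit 7 (here q >= 8, since value >= 256)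
--     return ((39 - q) << 7) + ((value >> (q - 7)) & 0x7F)
-- ===== Notes on version B (the rewrite author's own statement) =====
-- stated objective: simpler
-- what changed: The final branch's two shift-loops (normalize the value by repeated left shifts while counting) are replaced by a closed form computed from bit_length: take the highest and lowest set bit, raise if their span exceeds eight bits, else shift the value so its top set bit lands on bit seven and combine that byte with the derived rotation count; the range check and the four special-pattern branches are kept.
import Mathlib
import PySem

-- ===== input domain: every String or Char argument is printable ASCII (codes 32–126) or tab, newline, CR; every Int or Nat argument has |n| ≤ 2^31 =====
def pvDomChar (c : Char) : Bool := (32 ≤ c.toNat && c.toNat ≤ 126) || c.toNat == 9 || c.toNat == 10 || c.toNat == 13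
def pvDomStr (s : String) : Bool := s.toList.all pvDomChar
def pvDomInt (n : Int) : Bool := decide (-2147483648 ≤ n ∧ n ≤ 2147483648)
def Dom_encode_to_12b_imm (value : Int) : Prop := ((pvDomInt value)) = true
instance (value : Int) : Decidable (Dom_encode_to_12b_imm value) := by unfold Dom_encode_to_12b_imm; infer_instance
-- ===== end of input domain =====

-- B replaces the two shift loops of the final branch by a closed form from bit_length (highest/lowest set bit); objective: simpler.


-- ===== PORT A =====
-- first while loop: `while value & 0xFFFFFF != 0: left_shifts += 1; value <<= 1`
-- (fuel only makes the recursion total; 64 is never exhausted on the admitted inputs)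
def pvLoop1A (fuel : Nat) (shifts : Int) (value : Int) : Int × Int :=
  match fuel with
  | 0 => (shifts, value)
  | f + 1 =>
    if PySem.Int.band value 0xFFFFFF ≠ 0 then pvLoop1A f (shifts + 1) (value <<< (1 : Nat))
    else (shifts, value)

-- second while loop: `while value >> 7 != 1: left_shifts += 1; value <<= 1`
def pvLoop2A (fuel : Nat) (shifts : Int) (value : Int) : Int × Int :=
  match fuel with
  | 0 => (shifts, value)
  | f + 1 =>
    if value >>> (7 : Nat) ≠ 1 then pvLoop2A f (shifts + 1) (value <<< (1 : Nat))
    else (shifts, value)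

-- `raise ValueError` paths return 0 (excluded by Pre_)
def encode_to_12b_imm (value : Int) : Int :=
  if value > 0xFFFFFFFF then 0
  else if 0 ≤ value ∧ value < 256 then value
  else if PySem.Int.band value 0xFF00FF00 = 0 ∧ PySem.Int.band value 0xFF = PySem.Int.band (value >>> (16 : Nat)) 0xFF then
    0x100 + PySem.Int.band value 0xFF
  else if PySem.Int.band value 0x00FF00FF = 0 ∧ PySem.Int.band (value >>> (8 : Nat)) 0xFF = PySem.Int.band (value >>> (24 : Nat)) 0xFF then
    0x200 + PySem.Int.band (value >>> (8 : Nat)) 0xFF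
  else if value >>> (24 : Nat) = PySem.Int.band (value >>> (16 : Nat)) 0xFF ∧
          PySem.Int.band (value >>> (16 : Nat)) 0xFF = PySem.Int.band (value >>> (8 : Nat)) 0xFF ∧
          PySem.Int.band (value >>> (8 : Nat)) 0xFF = PySem.Int.band value 0xFF then
    0x300 + PySem.Int.band value 0xFF
  else
    let p1 := pvLoop1A 64 0 value
    if PySem.Int.band 0xFFFFFF00FFFFFF p1.2 ≠ 0 then 0
    else
      let v2 := (PySem.Int.band p1.2 0xFF000000) >>> (24 : Nat)
      let p2 := pvLoop2A 64 (p1.1 + 8) v2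
      (p2.1 <<< (7 : Nat)) + PySem.Int.band p2.2 0x7F

-- ===== PORT B =====
-- `raise ValueError` paths return 0 (excluded by Pre_); in the final branch value ≥ 256,
-- so q ≥ 8 and the shift amount q - 7 is nonnegative (toNat is exact there)
def encode_to_12b_imm_alt (value : Int) : Int :=
  if value > 0xFFFFFFFF then 0
  else if 0 ≤ value ∧ value < 256 then value
  else if PySem.Int.band value 0xFF00FF00 = 0 ∧ PySem.Int.band value 0xFF = PySem.Int.band (value >>> (16 : Nat)) 0xFF then
    0x100 + PySem.Int.band value 0xFF
  else if PySem.Int.band value 0x00FF00FF = 0 ∧ PySem.Int.band (value >>> (8 : Nat)) 0xFF = PySem.Int.band (value >>> (24 : Nat)) 0xFF then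
    0x200 + PySem.Int.band (value >>> (8 : Nat)) 0xFF
  else if value >>> (24 : Nat) = PySem.Int.band (value >>> (16 : Nat)) 0xFF ∧
          PySem.Int.band (value >>> (16 : Nat)) 0xFF = PySem.Int.band (value >>> (8 : Nat)) 0xFF ∧
          PySem.Int.band (value >>> (8 : Nat)) 0xFF = PySem.Int.band value 0xFF then
    0x300 + PySem.Int.band value 0xFF
  else if value ≤ 0 then 0
  else
    let q : Int := (PySem.Int.bitLength value : Int) - 1
    let lsb : Int := (PySem.Int.bitLength (PySem.Int.band value (-value)) : Int) - 1
    if q - lsb > 7 then 0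
    else ((39 - q) <<< (7 : Nat)) + PySem.Int.band (value >>> (q - 7).toNat) 0x7F

-- ===== PRECONDITION & SPEC =====
-- Pre_: exactly the inputs (inside Dom) on which A returns: the four special patterns,
-- or a byte with top bit set shifted left by 1..24 (A raises ValueError elsewhere).
def Pre_encode_to_12b_imm (value : Int) : Prop :=
  (0 ≤ value ∧ value < 256)
  ∨ (PySem.Int.band value 0xFF00FF00 = 0 ∧ PySem.Int.band value 0xFF = PySem.Int.band (value >>> (16 : Nat)) 0xFF)
  ∨ (PySem.Int.band value 0x00FF00FF = 0 ∧ PySem.Int.band (value >>> (8 : Nat)) 0xFF = PySem.Int.band (value >>> (24 : Nat)) 0xFF)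
  ∨ (value >>> (24 : Nat) = PySem.Int.band (value >>> (16 : Nat)) 0xFF ∧
     PySem.Int.band (value >>> (16 : Nat)) 0xFF = PySem.Int.band (value >>> (8 : Nat)) 0xFF ∧
     PySem.Int.band (value >>> (8 : Nat)) 0xFF = PySem.Int.band value 0xFF)
  ∨ (∃ m : Nat, m < 256 ∧ ∃ k : Nat, k < 25 ∧ 128 ≤ m ∧ 1 ≤ k ∧ value = (m : Int) * 2 ^ k)

instance (value : Int) : Decidable (Pre_encode_to_12b_imm value) := by
  unfold Pre_encode_to_12b_imm; infer_instance

def pvWitness_encode_to_12b_imm : Int := 5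

def Spec_encode_to_12b_imm (value : Int) (out : Int) : Prop := out = encode_to_12b_imm_alt value
instance (value : Int) (out : Int) : Decidable (Spec_encode_to_12b_imm value out) := by unfold Spec_encode_to_12b_imm; infer_instance

-- ===== CLAIM (what is proved, stated in full; the proofs are below) =====
def Claim_equal_encode_to_12b_imm : Prop := ∀ (value : Int), Dom_encode_to_12b_imm value → Pre_encode_to_12b_imm value → Spec_encode_to_12b_imm value (encode_to_12b_imm value)

-- ===== LEMMAS AND PROOFS =====

-- on shifted-byte inputs the two ports agree (finite check over all 128 × 24 shapes)
set_option maxRecDepth 10000 in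
set_option maxHeartbeats 4000000 in
theorem pv_shape_eq : ∀ m : Nat, m < 256 → ∀ k : Nat, k < 25 → 128 ≤ m → 1 ≤ k →
    encode_to_12b_imm ((m : Int) * 2 ^ k) = encode_to_12b_imm_alt ((m : Int) * 2 ^ k) := by decide

-- on inputs taken by one of the first five (identical) branches the two ports agree
theorem pv_branch_eq (value : Int) (h0 : ¬ value > 0xFFFFFFFF)
    (h : (0 ≤ value ∧ value < 256)
      ∨ (PySem.Int.band value 0xFF00FF00 = 0 ∧ PySem.Int.band value 0xFF = PySem.Int.band (value >>> (16 : Nat)) 0xFF)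
      ∨ (PySem.Int.band value 0x00FF00FF = 0 ∧ PySem.Int.band (value >>> (8 : Nat)) 0xFF = PySem.Int.band (value >>> (24 : Nat)) 0xFF)
      ∨ (value >>> (24 : Nat) = PySem.Int.band (value >>> (16 : Nat)) 0xFF ∧
         PySem.Int.band (value >>> (16 : Nat)) 0xFF = PySem.Int.band (value >>> (8 : Nat)) 0xFF ∧
         PySem.Int.band (value >>> (8 : Nat)) 0xFF = PySem.Int.band value 0xFF)) :
    encode_to_12b_imm value = encode_to_12b_imm_alt value := by
  unfold encode_to_12b_imm encode_to_12b_imm_alt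
  split_ifs <;> first | rfl | tauto

-- ===== VERDICT (by name: the statement is the Claim_ definition above) =====
theorem encode_to_12b_imm_spec : Claim_equal_encode_to_12b_imm := by
  intro value hDom hPre
  unfold Spec_encode_to_12b_imm
  have h0 : ¬ value > 0xFFFFFFFF := by
    unfold Dom_encode_to_12b_imm pvDomInt at hDom
    simp only [decide_eq_true_eq] at hDom
    omega
  rcases hPre with h | h | h | h | ⟨m, hm, k, hk, hm2, hk2, hv⟩
  · exact pv_branch_eq value h0 (Or.inl h)
  · exact pv_branch_eq value h0 (Or.inr (Or.inl h))
  · exact pv_branch_eq value h0 (Or.inr (Or.inr (Or.inl h)))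
  · exact pv_branch_eq value h0 (Or.inr (Or.inr (Or.inr h)))
  · rw [hv]; exact pv_shape_eq m hm k hk hm2 hk2
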